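-- pv_equiv track=rewrite | github.com/faramesh/faramesh-core | visibility-server/app/state.py | _normalize_domain_tool_name
-- ===== SOURCE A (Python) =====
-- def _normalize_domain_tool_name(tool_name: str, operation: str) -> tuple[str, str]:
--     raw = (tool_name or "").strip()
--     if not raw:
--         return raw, operation
--
--     for domain in ("bash", "db", "infra", "payments"):
--         prefix = f"{domain}_"
--         if raw == domain:
--             return domain, operation
--         if raw.startswith(prefix):
--             op = raw[len(prefix) :].strip() or operation
--             return domain, op
--
--     return raw, operation
-- ===== SOURCE B (Python) =====
-- DOMAINS = {"bash", "db", "infra", "payments"}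
--
--
-- def _normalize_domain_tool_name(tool_name: str, operation: str) -> tuple[str, str]:
--     raw = (tool_name or "").strip()
--     if not raw:
--         return raw, operation
--     head, _sep, rest = raw.partition("_")
--     if head in DOMAINS:
--         return head, (rest.strip() or operation)
--     return raw, operation
-- ===== Notes on version B (the rewrite author's own statement) =====
-- stated objective: simpler
-- what changed: Replaces the four-iteration prefix loop with its per-domain equality and startswith double-check by a single partition at the first underscore plus one set-membership test of the head.
import Mathlib
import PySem

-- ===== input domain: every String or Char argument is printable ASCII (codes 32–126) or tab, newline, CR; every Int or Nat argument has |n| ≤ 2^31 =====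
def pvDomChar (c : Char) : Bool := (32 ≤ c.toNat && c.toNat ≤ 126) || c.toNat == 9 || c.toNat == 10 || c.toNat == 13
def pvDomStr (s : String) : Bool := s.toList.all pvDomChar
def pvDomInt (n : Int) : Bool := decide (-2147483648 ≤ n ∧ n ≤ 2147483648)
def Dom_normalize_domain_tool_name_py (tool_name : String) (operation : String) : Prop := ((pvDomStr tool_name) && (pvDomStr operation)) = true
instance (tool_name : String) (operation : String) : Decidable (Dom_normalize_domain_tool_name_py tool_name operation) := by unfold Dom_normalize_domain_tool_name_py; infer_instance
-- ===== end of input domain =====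

-- B replaces A's four-iteration prefix loop (equality + startswith per domain) by one
-- partition at the first underscore plus a single set-membership test of the head (simpler).

-- ===== PORT A =====
-- the for-loop over the literal domain tuple, as structural recursion over that list
def pvLoopA (raw op : String) : List String → String × String
  | [] => (raw, op)
  | d :: rest =>
    if raw = d then (d, op)
    else if PySem.Str.startswith raw (d ++ "_") = true then
      -- op = raw[len(prefix):].strip() or operation
      let o := PySem.Str.strip (PySem.Str.slice raw (some ((PySem.Str.len (d ++ "_") : Int))) none)
      (d, if o = "" then op else o)
    else pvLoopA raw op rest

def normalize_domain_tool_name_py (tool_name : String) (operation : String) : String × String :=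
  let raw := PySem.Str.strip (if tool_name = "" then "" else tool_name)  -- (tool_name or "").strip()
  if raw = "" then (raw, operation)
  else pvLoopA raw operation ["bash", "db", "infra", "payments"]

-- ===== PORT B =====
-- DOMAINS = {"bash", "db", "infra", "payments"}  (a Python set literal)
def pvDOMAINS : PySem.Set String := PySem.Set.ofList ["bash", "db", "infra", "payments"]

-- raw.partition("_") ported by hand (PySem has no partition): head is everything before the
-- first '_', rest everything after it ("" when no '_' occurs) — exact for str.partition.
def normalize_domain_tool_name_py_alt (tool_name : String) (operation : String) : String × String :=
  let raw := PySem.Str.strip (if tool_name = "" then "" else tool_name)  -- (tool_name or "").strip()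
  if raw = "" then (raw, operation)
  else
    let head := String.ofList (raw.toList.takeWhile (fun c => c != '_'))
    let rest := String.ofList ((raw.toList.dropWhile (fun c => c != '_')).drop 1)
    if PySem.Set.contains pvDOMAINS head = true then
      let o := PySem.Str.strip rest
      (head, if o = "" then operation else o)
    else (raw, operation)

-- ===== PRECONDITION & SPEC =====
def Spec_normalize_domain_tool_name_py (tool_name : String) (operation : String) (out : String × String) : Prop := out = normalize_domain_tool_name_py_alt tool_name operation
instance (tool_name : String) (operation : String) (out : String × String) : Decidable (Spec_normalize_domain_tool_name_py tool_name operation out) := by unfold Spec_normalize_domain_tool_name_py; infer_instance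

-- ===== CLAIM (what is proved, stated in full; the proofs are below) =====
def Claim_equal_normalize_domain_tool_name_py : Prop := ∀ (tool_name : String) (operation : String), Dom_normalize_domain_tool_name_py tool_name operation → Spec_normalize_domain_tool_name_py tool_name operation (normalize_domain_tool_name_py tool_name operation)

-- ===== LEMMAS AND PROOFS =====

-- strings with equal character lists are equal
theorem pv_str_ext {s t : String} (h : s.toList = t.toList) : s = t := by
  have := congrArg String.ofList h; simpa using this

-- takeWhile (≠ '_') hits a given '_'-free list d exactly on d itself or on d ++ '_' :: u
theorem pv_tw (d : List Char) : '_' ∉ d → ∀ ts : List Char,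
    (ts.takeWhile (fun c => c != '_') = d ↔ (ts = d ∨ ∃ u, ts = d ++ '_' :: u)) := by
  induction d with
  | nil =>
    intro _ ts
    cases ts with
    | nil => simp
    | cons c u =>
      by_cases hc : c = '_' <;> simp [hc]
  | cons e d' ih =>
    intro hd ts
    have he : e ≠ '_' := by simp at hd; exact fun h => hd.1 h.symm
    have hd' : '_' ∉ d' := by simp at hd; tauto
    cases ts with
    | nil => simp
    | cons c u =>
      by_cases hc : c = '_'
      · subst hc
        simp [Ne.symm he]
      · simp only [List.takeWhile_cons]
        simp only [bne_iff_ne, ne_eq, hc, not_false_eq_true, if_pos, List.cons.injEq,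
          List.cons_append]
        constructor
        · rintro ⟨rfl, h⟩
          rcases (ih hd' u).mp h with h1 | ⟨v, rfl⟩
          · exact Or.inl ⟨rfl, h1⟩
          · exact Or.inr ⟨v, rfl, rfl⟩
        · rintro (⟨rfl, h⟩ | ⟨v, rfl, h⟩)
          · exact ⟨rfl, (ih hd' u).mpr (Or.inl h)⟩
          · exact ⟨rfl, (ih hd' u).mpr (Or.inr ⟨v, h⟩)⟩

theorem pv_tw_self (d : List Char) (hd : '_' ∉ d) : d.takeWhile (fun c => c != '_') = d :=
  (pv_tw d hd d).mpr (Or.inl rfl)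

theorem pv_dw_self (d : List Char) (hd : '_' ∉ d) : d.dropWhile (fun c => c != '_') = [] := by
  induction d with
  | nil => rfl
  | cons e d' ih =>
    simp at hd
    simp [Ne.symm hd.1, ih hd.2]

theorem pv_dw_app (d : List Char) (hd : '_' ∉ d) (u : List Char) :
    (d ++ '_' :: u).dropWhile (fun c => c != '_') = '_' :: u := by
  induction d with
  | nil => simp
  | cons e d' ih =>
    simp at hd
    simp [Ne.symm hd.1, ih hd.2]

-- one iteration of A's loop, rephrased as a test on the partition head
theorem pv_stepA (raw op : String) (k : String × String) (d : String) (hd : '_' ∉ d.toList) :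
    (if raw = d then (d, op)
     else if PySem.Str.startswith raw (d ++ "_") = true then
       (let o := PySem.Str.strip (PySem.Str.slice raw (some ((PySem.Str.len (d ++ "_") : Int))) none);
        (d, if o = "" then op else o))
     else k)
    =
    (if raw.toList.takeWhile (fun c => c != '_') = d.toList then
       (let o := PySem.Str.strip (String.ofList ((raw.toList.dropWhile (fun c => c != '_')).drop 1));
        (d, if o = "" then op else o))
     else k) := by
  have happ : (d ++ "_").toList = d.toList ++ ['_'] := by simp
  by_cases h1 : raw = d
  · subst h1
    rw [if_pos rfl, if_pos (pv_tw_self _ hd)]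
    rw [pv_dw_self _ hd]
    simp [show PySem.Str.strip "" = "" from by decide]
  · rw [if_neg h1]
    by_cases h2 : PySem.Str.startswith raw (d ++ "_") = true
    · rw [if_pos h2]
      have hpre : (d ++ "_").toList <+: raw.toList := by
        have := PySem.Str.startswith_eq raw (d ++ "_")
        rw [this] at h2
        exact (PySem.Chars.startswith_iff _ _).mp h2
      rcases hpre with ⟨u, hu⟩
      rw [happ] at hu
      have hts : raw.toList = d.toList ++ '_' :: u := by
        simpa using hu.symm
      have htw : raw.toList.takeWhile (fun c => c != '_') = d.toList :=
        (pv_tw _ hd _).mpr (Or.inr ⟨u, hts⟩)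
      rw [if_pos htw]
      have hslice : (PySem.Str.slice raw (some ((PySem.Str.len (d ++ "_") : Int))) none)
          = String.ofList u := by
        apply pv_str_ext
        have hn : (PySem.Str.len (d ++ "_") : Int) = ((d.toList.length + 1 : Nat) : Int) := by
          simp [happ]
        rw [show (PySem.Str.slice raw (some ((PySem.Str.len (d ++ "_") : Int))) none).toList
            = PySem.List.slice raw.toList (some ((PySem.Str.len (d ++ "_") : Int))) none from by simp]
        rw [hn, PySem.List.slice_from_natCast, hts]
        have h9 : List.drop (d.toList.length + 1) (d.toList ++ '_' :: u) = u := by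
          rw [show d.toList ++ '_' :: u = (d.toList ++ ['_']) ++ u from by simp,
              show d.toList.length + 1 = (d.toList ++ ['_']).length from by rw [List.length_append]; rfl,
              List.drop_left]
        rw [h9]
        simp
      have hdw : (raw.toList.dropWhile (fun c => c != '_')).drop 1 = u := by
        rw [hts, pv_dw_app _ hd]; rfl
      rw [hslice, hdw]
    · rw [if_neg h2]
      have htw : ¬ raw.toList.takeWhile (fun c => c != '_') = d.toList := by
        intro h
        rcases (pv_tw _ hd _).mp h with h | ⟨u, hu⟩
        · exact h1 (pv_str_ext (by simpa using h))
        · apply h2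
          rw [PySem.Str.startswith_eq, PySem.Chars.startswith_iff, happ]
          exact ⟨u, by simpa using hu.symm⟩
      rw [if_neg htw]

-- ===== VERDICT (by name: the statement is the Claim_ definition above) =====
set_option maxHeartbeats 1000000 in
theorem normalize_domain_tool_name_py_spec : Claim_equal_normalize_domain_tool_name_py := by
  intro tool_name operation _
  unfold Spec_normalize_domain_tool_name_py
  unfold normalize_domain_tool_name_py normalize_domain_tool_name_py_alt
  set raw := PySem.Str.strip (if tool_name = "" then "" else tool_name) with hraw
  by_cases h0 : raw = ""
  · simp [h0]
  · rw [if_neg h0, if_neg h0]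
    show pvLoopA raw operation ["bash", "db", "infra", "payments"] = _
    simp only [pvLoopA]
    rw [pv_stepA raw operation _ "bash" (by decide),
        pv_stepA raw operation _ "db" (by decide),
        pv_stepA raw operation _ "infra" (by decide),
        pv_stepA raw operation _ "payments" (by decide)]
    set head := raw.toList.takeWhile (fun c => c != '_') with hhead
    have hD : pvDOMAINS = ["bash", "db", "infra", "payments"] := by decide
    have hlist : ∀ h : List Char, ∀ d : String, String.ofList h = d → h = d.toList := by
      intro h d hh; rw [← hh]; simp
    by_cases hb : head = ['b', 'a', 's', 'h']
    ·       simp [hb, hD, PySem.Set.contains]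
    · by_cases hdb : head = ['d', 'b']
      ·         simp [hdb, hD, PySem.Set.contains]
      · by_cases hi : head = ['i', 'n', 'f', 'r', 'a']
        ·           simp [hi, hD, PySem.Set.contains]
        · by_cases hp : head = ['p', 'a', 'y', 'm', 'e', 'n', 't', 's']
          ·             simp [hp, hD, PySem.Set.contains]
          · have hne1 : ¬ String.ofList head = "bash" := fun h => hb (by simpa using hlist _ _ h)
            have hne2 : ¬ String.ofList head = "db" := fun h => hdb (by simpa using hlist _ _ h)
            have hne3 : ¬ String.ofList head = "infra" := fun h => hi (by simpa using hlist _ _ h)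
            have hne4 : ¬ String.ofList head = "payments" := fun h => hp (by simpa using hlist _ _ h)
            simp [hb, hdb, hi, hp, hD, PySem.Set.contains, hne1, hne2, hne3, hne4]
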